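-- pv_equiv track=rewrite | github.com/bvlebvle/ArqSoftware | funciones_gmeds.py | obtenerParametros
-- ===== SOURCE A (Python) =====
-- def obtenerParametros(parametros):
--     pos_caracter = []
--     for i in range(0, len(parametros)):
--         if parametros[i] == '-':
--             pos_caracter.append(i)
--
--     nombre = parametros[0:pos_caracter[0]]
--     apellido = parametros[pos_caracter[0]+1:pos_caracter[1]]
--     especialidad = parametros[pos_caracter[1]+1:]
--     return nombre, apellido, especialidad
-- ===== SOURCE B (Python) =====
-- def obtenerParametros(parametros):
--     parts = parametros.split('-', 2)
--     return parts[0], parts[1], parts[2]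
-- ===== Notes on version B (the rewrite author's own statement) =====
-- stated objective: simpler
-- what changed: Replaces the explicit dash-position-collecting loop and manual slicing by a single split('-', 2) with explicit indexing, which yields the same three fields (the third keeps any further dashes) and the same IndexError on fewer than two dashes.
import Mathlib
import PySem

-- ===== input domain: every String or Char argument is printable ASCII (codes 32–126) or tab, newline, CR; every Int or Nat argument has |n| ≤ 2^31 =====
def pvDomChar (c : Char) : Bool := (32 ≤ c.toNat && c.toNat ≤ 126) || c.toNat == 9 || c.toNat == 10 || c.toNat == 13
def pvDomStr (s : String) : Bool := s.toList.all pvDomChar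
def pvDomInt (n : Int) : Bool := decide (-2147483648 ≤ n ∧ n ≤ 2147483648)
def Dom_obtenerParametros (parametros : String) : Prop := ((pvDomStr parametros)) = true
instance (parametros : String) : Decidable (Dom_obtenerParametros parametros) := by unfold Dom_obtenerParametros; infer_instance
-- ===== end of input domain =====

-- B replaces A's dash-position-collecting loop and manual slicing by a single split('-', 2)
-- with explicit indexing: simpler, same IndexError on fewer than two dashes (excluded by Pre_).

-- ===== PORT A =====
def obtenerParametros (parametros : String) : String × String × String :=
  let cs := parametros.toList
  -- pos_caracter = []; for i in range(0, len(parametros)): if parametros[i] == '-': append i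
  let pos : List Int :=
    (PySem.List.pyRange 0 (cs.length : Int)).foldl
      (fun acc i => if PySem.List.pyGet? cs i = some '-' then acc ++ [i] else acc) []
  -- pos_caracter[0] / pos_caracter[1]: IndexError (none) when fewer than two dashes — excluded by Pre_
  match PySem.List.pyGet? pos 0 with
  | none => ("", "", "")
  | some p0 =>
    match PySem.List.pyGet? pos 1 with
    | none => ("", "", "")
    | some p1 =>
        (String.ofList (PySem.List.slice cs (some 0) (some p0)),
         String.ofList (PySem.List.slice cs (some (p0 + 1)) (some p1)),
         String.ofList (PySem.List.slice cs (some (p1 + 1)) none))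

-- ===== PORT B =====
def obtenerParametros_alt (parametros : String) : String × String × String :=
  -- parts = parametros.split('-', 2)
  let parts := (PySem.Str.splitMax? parametros "-" 2).getD []
  -- parts[0], parts[1], parts[2]: IndexError (none) when fewer than two dashes — excluded by Pre_
  match PySem.List.pyGet? parts 0 with
  | none => ("", "", "")
  | some a =>
    match PySem.List.pyGet? parts 1 with
    | none => ("", "", "")
    | some b =>
      match PySem.List.pyGet? parts 2 with
      | none => ("", "", "")
      | some c => (a, b, c)

-- ===== PRECONDITION & SPEC =====
-- Pre_ excludes exactly the strings with fewer than two '-', on which Python A raises IndexError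
-- (pos_caracter[1] out of range); B raises IndexError there too (parts[2]).
def Pre_obtenerParametros (parametros : String) : Prop := 2 ≤ parametros.toList.count '-'
instance (parametros : String) : Decidable (Pre_obtenerParametros parametros) := by
  unfold Pre_obtenerParametros; infer_instance

def pvWitness_obtenerParametros : String := "ana-gomez-cardio"

def Spec_obtenerParametros (parametros : String) (out : String × String × String) : Prop :=
  out = obtenerParametros_alt parametros
instance (parametros : String) (out : String × String × String) :
    Decidable (Spec_obtenerParametros parametros out) := by unfold Spec_obtenerParametros; infer_instance

-- ===== CLAIM (what is proved, stated in full; the proofs are below) =====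
def Claim_equal_obtenerParametros : Prop :=
  ∀ (parametros : String), Dom_obtenerParametros parametros →
    Pre_obtenerParametros parametros →
    Spec_obtenerParametros parametros (obtenerParametros parametros)

-- ===== LEMMAS AND PROOFS =====

-- Decomposition: a string with at least two dashes is a ++ '-' :: b ++ '-' :: c with no dash in a or b.
lemma split_first_dash (cs : List Char) (h : '-' ∈ cs) :
    ∃ a r, cs = a ++ '-' :: r ∧ '-' ∉ a := by
  induction cs with
  | nil => simp at h
  | cons x t ih =>
    by_cases hx : x = '-'
    · exact ⟨[], t, by simp [hx], by simp⟩
    · have ht : '-' ∈ t := by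
        rcases List.mem_cons.mp h with h | h
        · exact absurd h.symm hx
        · exact h
      obtain ⟨a, r, hr, ha⟩ := ih ht
      refine ⟨x :: a, r, by simp [hr], ?_⟩
      intro hm
      rcases List.mem_cons.mp hm with hh | hh
      · exact hx hh.symm
      · exact ha hh

lemma decomp_two_dashes (cs : List Char) (h : 2 ≤ cs.count '-') :
    ∃ a b c, cs = a ++ '-' :: (b ++ '-' :: c) ∧ '-' ∉ a ∧ '-' ∉ b := by
  have h1 : '-' ∈ cs := List.count_pos_iff.mp (by omega)
  obtain ⟨a, r, hr, ha⟩ := split_first_dash cs h1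
  have hca : a.count '-' = 0 := List.count_eq_zero.mpr ha
  have hcr : 1 ≤ r.count '-' := by
    have h2 : cs.count '-' = a.count '-' + (r.count '-' + 1) := by
      rw [hr]; simp [List.count_append]
    omega
  obtain ⟨b, c, hc, hb⟩ := split_first_dash r (List.count_pos_iff.mp (by omega))
  exact ⟨a, b, c, by rw [hr, hc], ha, hb⟩

-- The filtered index list of dash positions.
def dashIdx (cs : List Char) : List Nat :=
  (List.range cs.length).filter (fun i => decide (cs[i]? = some '-'))

lemma dashIdx_append (u v : List Char) :
    dashIdx (u ++ v) = dashIdx u ++ (dashIdx v).map (u.length + ·) := by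
  unfold dashIdx
  rw [List.length_append, List.range_add, List.filter_append]
  congr 1
  · apply List.filter_congr
    intro i hi
    rw [List.mem_range] at hi
    rw [List.getElem?_append_left hi]
  · rw [List.filter_map]
    congr 1
    apply List.filter_congr
    intro j hj
    have : (u ++ v)[u.length + j]? = v[j]? := by
      rw [List.getElem?_append_right (by omega)]
      congr 1
      omega
    simp only [Function.comp]
    rw [this]

lemma dashIdx_no_dash (u : List Char) (h : '-' ∉ u) : dashIdx u = [] := by
  unfold dashIdx
  rw [List.filter_eq_nil_iff]
  intro i hi
  rw [List.mem_range] at hi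
  simp only [decide_eq_true_eq]
  intro hcontra
  rw [List.getElem?_eq_getElem hi] at hcontra
  exact h (by
    have := Option.some.inj hcontra
    rw [← this]
    exact List.getElem_mem hi)

lemma dashIdx_dash_cons (v : List Char) :
    dashIdx ('-' :: v) = 0 :: (dashIdx v).map (1 + ·) := by
  have : ('-' :: v) = ['-'] ++ v := rfl
  rw [this, dashIdx_append]
  have : dashIdx ['-'] = [0] := by decide
  rw [this]
  rfl

lemma dashIdx_decomp (a b c : List Char) (ha : '-' ∉ a) (hb : '-' ∉ b) :
    ∃ t, dashIdx (a ++ '-' :: (b ++ '-' :: c)) =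
      a.length :: (a.length + 1 + b.length) :: t := by
  rw [dashIdx_append, dashIdx_no_dash a ha, dashIdx_dash_cons,
      dashIdx_append, dashIdx_no_dash b hb, dashIdx_dash_cons]
  refine ⟨((dashIdx c).map (1 + ·)).map (b.length + ·) |>.map (1 + ·) |>.map (a.length + ·), ?_⟩
  simp [List.map_map]
  omega

-- A's fold collects exactly the dash indices (as Ints).
lemma posList_eq (cs : List Char) :
    (PySem.List.pyRange 0 (cs.length : Int)).foldl
        (fun acc i => if PySem.List.pyGet? cs i = some '-' then acc ++ [i] else acc) [] =
      List.map (fun n : Nat => (n : Int)) (dashIdx cs) := by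
  rw [PySem.List.pyRange_zero_natCast, PySem.List.foldl_append_ite_eq_filter, List.nil_append,
      List.filter_map]
  unfold dashIdx
  congr 1
  apply List.filter_congr
  intro i _
  simp only [Function.comp]
  rw [PySem.List.pyGet?_natCast]

-- One step of splitOnMax.go over a dash-free stretch followed by a dash.
lemma go_cross (a : List Char) :
    ∀ (rest cur : List Char) (acc : List (List Char)) (fuel m : Nat),
      '-' ∉ a → a.length + 1 + rest.length ≤ fuel →
      PySem.Chars.splitOnMax.go ['-'] fuel (m + 1) (a ++ '-' :: rest) cur acc =
        PySem.Chars.splitOnMax.go ['-'] (fuel - (a.length + 1)) m rest [] ((cur.reverse ++ a) :: acc) := by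
  induction a with
  | nil =>
    intro rest cur acc fuel m _ hf
    simp only [List.length_nil] at hf ⊢
    obtain ⟨f, rfl⟩ : ∃ f, fuel = f + 1 := ⟨fuel - 1, by omega⟩
    simp [PySem.Chars.splitOnMax.go, List.isPrefixOf]
  | cons x t ih =>
    intro rest cur acc fuel m hx hf
    have hxd : x ≠ '-' := fun h => hx (by simp [h])
    have ht : '-' ∉ t := fun h => hx (by simp [h])
    simp only [List.length_cons] at hf
    obtain ⟨f, rfl⟩ : ∃ f, fuel = f + 1 := ⟨fuel - 1, by omega⟩
    have hdx : ¬ ('-' = x) := fun h => hxd h.symm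
    have hstep : PySem.Chars.splitOnMax.go ['-'] (f + 1) (m + 1) ((x :: t) ++ '-' :: rest) cur acc =
        PySem.Chars.splitOnMax.go ['-'] f (m + 1) (t ++ '-' :: rest) (x :: cur) acc := by
      simp [PySem.Chars.splitOnMax.go, List.isPrefixOf, hdx]
    rw [hstep, ih rest (x :: cur) acc f m ht (by omega)]
    have hfl : f + 1 - ((x :: t).length + 1) = f - (t.length + 1) := by
      simp only [List.length_cons]; omega
    rw [hfl]
    simp

-- With the budget exhausted the rest is emitted as one final piece.
lemma go_mzero (l : List Char) (acc : List (List Char)) (fuel : Nat) :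
    PySem.Chars.splitOnMax.go ['-'] fuel 0 l [] acc = acc.reverse ++ [l] := by
  cases fuel with
  | zero => simp [PySem.Chars.splitOnMax.go]
  | succ f =>
    cases l with
    | nil => simp [PySem.Chars.splitOnMax.go]
    | cons x t => simp [PySem.Chars.splitOnMax.go]

lemma splitOnMax_two (a b c : List Char) (ha : '-' ∉ a) (hb : '-' ∉ b) :
    PySem.Chars.splitOnMax (a ++ '-' :: (b ++ '-' :: c)) ['-'] 2 = [a, b, c] := by
  unfold PySem.Chars.splitOnMax
  rw [if_neg (by omega)]
  have hlen : (a ++ '-' :: (b ++ '-' :: c)).length = a.length + 1 + b.length + 1 + c.length := by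
    simp; omega
  have h2 : (2 : Int).toNat = 1 + 1 := rfl
  rw [hlen, h2]
  rw [go_cross a (b ++ '-' :: c) [] [] _ 1 ha (by simp; omega)]
  rw [go_cross b c [] [[].reverse ++ a] _ 0 hb (by omega)]
  rw [go_mzero]
  simp

-- Slices of the decomposed string.
lemma slices_decomp (a b c : List Char) :
    PySem.List.slice (a ++ '-' :: (b ++ '-' :: c)) (some 0) (some (a.length : Int)) = a ∧
    PySem.List.slice (a ++ '-' :: (b ++ '-' :: c)) (some ((a.length : Int) + 1))
        (some ((a.length + 1 + b.length : Nat) : Int)) = b ∧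
    PySem.List.slice (a ++ '-' :: (b ++ '-' :: c)) (some (((a.length + 1 + b.length : Nat) : Int) + 1)) none = c := by
  set cs := a ++ '-' :: (b ++ '-' :: c) with hcs
  have e1 : ((a.length : Int) + 1) = ((a.length + 1 : Nat) : Int) := by push_cast; ring
  have e2 : (((a.length + 1 + b.length : Nat) : Int) + 1) = ((a.length + 1 + b.length + 1 : Nat) : Int) := by
    push_cast; ring
  have hd1 : cs = (a ++ ['-']) ++ (b ++ '-' :: c) := by simp [hcs]
  refine ⟨?_, ?_, ?_⟩
  · rw [PySem.List.slice_zero_start, PySem.List.slice_to_natCast, hcs, List.take_left]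
  · rw [e1, PySem.List.slice_natCast]
    have : a.length + 1 + b.length - (a.length + 1) = b.length := by omega
    rw [this, hd1]
    rw [show a.length + 1 = (a ++ ['-']).length by simp]
    rw [List.drop_left]
    have : b ++ '-' :: c = (b ++ ['-']) ++ c := by simp
    rw [this, List.take_append_of_le_length (by simp)]
    simp
  · rw [e2, PySem.List.slice_from_natCast, hd1]
    have : (a ++ ['-']) ++ (b ++ '-' :: c) = ((a ++ ['-']) ++ (b ++ ['-'])) ++ c := by simp
    rw [this, show a.length + 1 + b.length + 1 = ((a ++ ['-']) ++ (b ++ ['-'])).length by simp; omega,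
        List.drop_left]

lemma pyGet?_cons_zero {α : Type} (x : α) (t : List α) : PySem.List.pyGet? (x :: t) 0 = some x := by
  simp [PySem.List.pyGet?, PySem.List.pyIdx?]
lemma pyGet?_cons_one {α : Type} (x y : α) (t : List α) : PySem.List.pyGet? (x :: y :: t) 1 = some y := by
  simp [PySem.List.pyGet?, PySem.List.pyIdx?]
lemma pyGet?_cons_two {α : Type} (x y z : α) (t : List α) : PySem.List.pyGet? (x :: y :: z :: t) 2 = some z := by
  simp [PySem.List.pyGet?, PySem.List.pyIdx?, show (2 : Int) ≤ (t.length : Int) + 1 + 1 by omega]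

-- ===== VERDICT (by name: the statement is the Claim_ definition above) =====
theorem obtenerParametros_spec : Claim_equal_obtenerParametros := by
  intro s _ hpre
  unfold Spec_obtenerParametros
  unfold Pre_obtenerParametros at hpre
  obtain ⟨a, b, c, hdec, ha, hb⟩ := decomp_two_dashes s.toList hpre
  -- A side
  unfold obtenerParametros
  have hpos := posList_eq s.toList
  obtain ⟨t, hidx⟩ := dashIdx_decomp a b c ha hb
  rw [← hdec] at hidx
  rw [hidx, List.map_cons, List.map_cons] at hpos
  simp only [hpos, pyGet?_cons_zero, pyGet?_cons_one]
  -- B side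
  unfold obtenerParametros_alt
  have hsplit : PySem.Str.splitMax? s "-" 2 =
      some [String.ofList a, String.ofList b, String.ofList c] := by
    unfold PySem.Str.splitMax? PySem.Chars.splitMax?
    rw [if_neg (by simp)]
    rw [show ("-" : String).toList = ['-'] from rfl, hdec, splitOnMax_two a b c ha hb]
    rfl
  rw [hsplit]
  simp only [Option.getD_some, pyGet?_cons_zero, pyGet?_cons_one, pyGet?_cons_two]
  obtain ⟨h1, h2, h3⟩ := slices_decomp a b c
  rw [← hdec] at h1 h2 h3
  rw [h1, h2, h3]
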